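-- pv_equiv track=rewrite | github.com/Y0ngg4n/metallb-dyndns | main.py | getIPv6Prefix
-- ===== SOURCE A (Python) =====
-- def getIPv6Prefix(ipv6Addr, prefixLen):
--     prefix = ""
--     curPrefixLen = 0
--     ipv6Parts = ipv6Addr.split(":")
--     for part in ipv6Parts:
--         if not prefix == "":  # if it's not empty
--             prefix = prefix + ":"
--         prefix = prefix + part
--         curPrefixLen += 32
--         if int(curPrefixLen) >= int(prefixLen):
--             return prefix
--     return prefix
-- ===== SOURCE B (Python) =====
-- def getIPv6Prefix(ipv6Addr, prefixLen):
--     parts = ipv6Addr.split(":")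
--     pl = int(prefixLen)
--     n = max(1, -(-pl // 32))
--     n = min(n, len(parts))
--     return ":".join(parts[:n])
-- ===== Notes on version B (the rewrite author's own statement) =====
-- stated objective: simpler
-- what changed: B replaces A's accumulate-and-test loop by a closed-form count of groups (n = min(len(parts), max(1, ceil(prefixLen/32)))) followed by a single ':'.join(parts[:n]).
-- intended difference: On addresses starting with ':' with prefixLen > 32, A's empty-prefix test silently drops the leading colon(s) (e.g. A('::1', 64) = '' and A(':1', 64) = '1'), while B keeps the empty leading groups and returns ':' resp. ':1', which is the intended join of the first ceil(prefixLen/32) groups. — e.g. on getIPv6Prefix(":1", 64): A returns "1", B returns ":1"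
import Mathlib
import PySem

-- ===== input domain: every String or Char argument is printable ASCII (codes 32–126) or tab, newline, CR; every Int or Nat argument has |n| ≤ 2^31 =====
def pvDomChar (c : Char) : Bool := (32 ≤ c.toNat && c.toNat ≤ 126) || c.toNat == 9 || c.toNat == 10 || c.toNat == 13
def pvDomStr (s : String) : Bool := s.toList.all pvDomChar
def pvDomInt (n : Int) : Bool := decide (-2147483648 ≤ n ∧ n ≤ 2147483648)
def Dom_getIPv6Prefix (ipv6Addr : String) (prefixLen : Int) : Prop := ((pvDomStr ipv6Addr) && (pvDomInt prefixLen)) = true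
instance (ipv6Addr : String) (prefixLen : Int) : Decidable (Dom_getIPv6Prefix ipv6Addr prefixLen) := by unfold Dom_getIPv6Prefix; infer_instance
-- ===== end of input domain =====

-- B builds the prefix by a closed-form group count and one join instead of A's
-- accumulate-and-test loop; on addresses starting with ':' (with prefixLen > 32) A drops
-- the leading colon(s), B keeps them (the intended difference D_ below).

-- ===== PORT A =====
-- A's for-loop over the split groups, carrying (prefix, curPrefixLen) exactly as A does.
def pvGetIPv6Loop (plen : Int) : List (List Char) → List Char → Int → List Char
  | [], pre, _ => pre
  | part :: rest, pre, cur =>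
      let pre1 := if pre = [] then pre else pre ++ [':']   -- if not prefix == "": prefix += ":"
      let pre2 := pre1 ++ part                             -- prefix += part
      let cur2 := cur + 32                                 -- curPrefixLen += 32
      if plen ≤ cur2 then pre2 else pvGetIPv6Loop plen rest pre2 cur2

def getIPv6Prefix (ipv6Addr : String) (prefixLen : Int) : String :=
  String.ofList (pvGetIPv6Loop prefixLen (PySem.Chars.splitOn ipv6Addr.toList [':']) [] 0)

-- ===== PORT B =====
def getIPv6Prefix_alt (ipv6Addr : String) (prefixLen : Int) : String :=
  let parts := PySem.Chars.splitOn ipv6Addr.toList [':']          -- ipv6Addr.split(":")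
  let n : Int := max 1 (-(PySem.Int.floordiv (-prefixLen) 32))    -- max(1, -(-pl // 32))
  let n2 : Int := min n (parts.length : Int)                      -- min(n, len(parts))
  String.ofList (PySem.Chars.join [':'] (PySem.List.slice parts none (some n2)))  -- ":".join(parts[:n])

-- ===== PRECONDITION & SPEC =====
-- On addresses starting with ':' with prefixLen > 32, A's empty-prefix test drops the leading
-- colon(s) (A ":1" 64 = "1"), while B keeps the empty leading group and returns ":1",
-- the intended ':'-join of the first ceil(prefixLen/32) groups.
def D_getIPv6Prefix (ipv6Addr : String) (prefixLen : Int) : Prop :=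
  PySem.Str.startswith ipv6Addr ":" = true ∧ 32 < prefixLen
instance (ipv6Addr : String) (prefixLen : Int) : Decidable (D_getIPv6Prefix ipv6Addr prefixLen) := by
  unfold D_getIPv6Prefix; infer_instance

def Spec_getIPv6Prefix (ipv6Addr : String) (prefixLen : Int) (out : String) : Prop :=
  ¬ D_getIPv6Prefix ipv6Addr prefixLen → out = getIPv6Prefix_alt ipv6Addr prefixLen
instance (ipv6Addr : String) (prefixLen : Int) (out : String) : Decidable (Spec_getIPv6Prefix ipv6Addr prefixLen out) := by
  unfold Spec_getIPv6Prefix; infer_instance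

def pvDiffWitness_getIPv6Prefix : String × Int := (":1", 64)
def pvDiffWitnessOut_getIPv6Prefix : String × String := ("1", ":1")

-- ===== CLAIM (what is proved, stated in full; the proofs are below) =====
def Claim_unchanged_getIPv6Prefix : Prop := ∀ (ipv6Addr : String) (prefixLen : Int), Dom_getIPv6Prefix ipv6Addr prefixLen → Spec_getIPv6Prefix ipv6Addr prefixLen (getIPv6Prefix ipv6Addr prefixLen)
def Claim_changed_getIPv6Prefix : Prop := Dom_getIPv6Prefix (pvDiffWitness_getIPv6Prefix.1) (pvDiffWitness_getIPv6Prefix.2) ∧ D_getIPv6Prefix (pvDiffWitness_getIPv6Prefix.1) (pvDiffWitness_getIPv6Prefix.2) ∧ getIPv6Prefix (pvDiffWitness_getIPv6Prefix.1) (pvDiffWitness_getIPv6Prefix.2) = pvDiffWitnessOut_getIPv6Prefix.1 ∧ getIPv6Prefix_alt (pvDiffWitness_getIPv6Prefix.1) (pvDiffWitness_getIPv6Prefix.2) = pvDiffWitnessOut_getIPv6Prefix.2 ∧ pvDiffWitnessOut_getIPv6Prefix.1 ≠ pvDiffWitnessOut_getIPv6Prefix.2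
def Claim_exact_getIPv6Prefix : Prop := ∀ (ipv6Addr : String) (prefixLen : Int), Dom_getIPv6Prefix ipv6Addr prefixLen → D_getIPv6Prefix ipv6Addr prefixLen → getIPv6Prefix ipv6Addr prefixLen ≠ getIPv6Prefix_alt ipv6Addr prefixLen

-- ===== LEMMAS AND PROOFS =====

-- Reference single-colon splitter (structural recursion; proofs only).
def pvSplit : List Char → List Char → List (List Char)
  | [], cur => [cur.reverse]
  | c :: rest, cur => if c = ':' then cur.reverse :: pvSplit rest [] else pvSplit rest (c :: cur)

lemma pvSplit_go_eq : ∀ (l : List Char) (fuel : Nat) (cur : List Char) (acc : List (List Char)),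
    l.length < fuel →
    PySem.Chars.splitOn.go [':'] fuel l cur acc = acc.reverse ++ pvSplit l cur := by
  intro l
  induction l with
  | nil =>
      intro fuel cur acc h
      cases fuel with
      | zero => omega
      | succ f => rw [PySem.Chars.splitOn.go.eq_def]; simp [pvSplit]
  | cons c rest ih =>
      intro fuel cur acc h
      cases fuel with
      | zero => omega
      | succ f =>
          rw [PySem.Chars.splitOn.go.eq_def]
          by_cases hc : c = ':'
          · subst hc
            simp [List.isPrefixOf, pvSplit, ih _ _ _ (by simpa using h)]
          · simp [List.isPrefixOf, hc, Ne.symm hc, pvSplit, ih _ _ _ (by simpa using h)]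

lemma pvSplitOn_eq (cs : List Char) : PySem.Chars.splitOn cs [':'] = pvSplit cs [] := by
  have := pvSplit_go_eq cs (cs.length + 1) [] [] (by omega)
  simpa [PySem.Chars.splitOn] using this

lemma pvSplit_ne_nil : ∀ (l cur : List Char), pvSplit l cur ≠ [] := by
  intro l
  induction l with
  | nil => intro cur; simp [pvSplit]
  | cons c rest ih =>
      intro cur
      by_cases hc : c = ':' <;> simp [pvSplit, hc, ih]

lemma pvSplit_head : ∀ (l cur : List Char), ∃ h t, pvSplit l cur = (cur.reverse ++ h) :: t := by
  intro l
  induction l with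
  | nil => intro cur; exact ⟨[], [], by simp [pvSplit]⟩
  | cons c rest ih =>
      intro cur
      by_cases hc : c = ':'
      · exact ⟨[], pvSplit rest [], by simp [pvSplit, hc]⟩
      · obtain ⟨h, t, ht⟩ := ih (c :: cur)
        refine ⟨c :: h, t, ?_⟩
        rw [pvSplit, if_neg hc, ht]
        simp

lemma pvSplit_no_colon : ∀ (l cur : List Char), ':' ∉ cur →
    ∀ p ∈ pvSplit l cur, ':' ∉ p := by
  intro l
  induction l with
  | nil =>
      intro cur hcur p hp
      simp [pvSplit] at hp; subst hp; simpa using hcur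
  | cons c rest ih =>
      intro cur hcur p hp
      by_cases hc : c = ':'
      · subst hc
        rw [pvSplit, if_pos rfl] at hp
        rcases List.mem_cons.mp hp with hp' | hp'
        · subst hp'; simpa using hcur
        · exact ih [] (by simp) p hp'
      · rw [pvSplit, if_neg hc] at hp
        exact ih (c :: cur) (by simp [hcur, Ne.symm hc]) p hp

-- number of groups A consumes starting 32·k against (plen - cur), capped at len, floored at 1
def pvK (d : Int) (len : Nat) : Nat := (min (max 1 (-((-d) / 32))) (len : Int)).toNat

def pvFlat (ps : List (List Char)) : List Char := ps.flatMap (fun p => ':' :: p)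

lemma pvJoin_cons (p : List Char) (l : List (List Char)) :
    PySem.Chars.join [':'] (p :: l) = p ++ pvFlat l := by
  induction l generalizing p with
  | nil => simp [PySem.Chars.join_singleton, pvFlat]
  | cons q t ih => simp [PySem.Chars.join_cons_cons, ih, pvFlat]

lemma pvK_one {d : Int} {len : Nat} (hd : d ≤ 32) (hl : 1 ≤ len) : pvK d len = 1 := by
  unfold pvK; omega

lemma pvK_step {d : Int} {rl : Nat} (hd : 32 < d) : pvK d (rl + 1) = pvK (d - 32) rl + 1 := by
  unfold pvK; omega

lemma pvK_two {d : Int} {len : Nat} (hd : 32 < d) (hl : 2 ≤ len) : 2 ≤ pvK d len := by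
  unfold pvK; omega

lemma pvLoop_char : ∀ (parts : List (List Char)) (pre : List Char) (cur plen : Int), pre ≠ [] →
    pvGetIPv6Loop plen parts pre cur = pre ++ pvFlat (parts.take (pvK (plen - cur) parts.length)) := by
  intro parts
  induction parts with
  | nil => intro pre cur plen _; simp [pvGetIPv6Loop, pvFlat]
  | cons p rest ih =>
      intro pre cur plen hpre
      simp only [pvGetIPv6Loop, if_neg hpre]
      by_cases hstop : plen ≤ cur + 32
      · rw [if_pos hstop, pvK_one (by omega) (by simp), List.take_one]
        simp [pvFlat]
      · rw [if_neg hstop]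
        rw [ih (pre ++ [':'] ++ p) (cur + 32) plen (by simp)]
        rw [show plen - (cur + 32) = (plen - cur) - 32 by ring_nf]
        rw [show (p :: rest).length = rest.length + 1 from rfl, pvK_step (by omega),
            List.take_succ_cons]
        simp [pvFlat]

lemma pvAlt_eq (ipv6Addr : String) (prefixLen : Int) :
    getIPv6Prefix_alt ipv6Addr prefixLen =
      String.ofList (PySem.Chars.join [':']
        ((PySem.Chars.splitOn ipv6Addr.toList [':']).take
          (pvK prefixLen (PySem.Chars.splitOn ipv6Addr.toList [':']).length))) := by
  show String.ofList (PySem.Chars.join [':']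
      (PySem.List.slice (PySem.Chars.splitOn ipv6Addr.toList [':']) none
        (some (min (max 1 (-(PySem.Int.floordiv (-prefixLen) 32)))
          ((PySem.Chars.splitOn ipv6Addr.toList [':']).length : Int))))) = _
  rw [PySem.Int.floordiv_eq_ediv_of_pos (by norm_num)]
  have h0 : (0 : Int) ≤ min (max 1 (-((-prefixLen) / 32)))
      ((PySem.Chars.splitOn ipv6Addr.toList [':']).length : Int) := by omega
  rw [PySem.List.slice_to (PySem.Chars.splitOn ipv6Addr.toList [':']) h0]
  rfl

lemma pvLoop_head : ∀ (parts : List (List Char)) (pre : List Char) (cur plen : Int),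
    pre.head? ≠ some ':' → (∀ p ∈ parts, ':' ∉ p) →
    (pvGetIPv6Loop plen parts pre cur).head? ≠ some ':' := by
  intro parts
  induction parts with
  | nil => intro pre cur plen h _; simpa [pvGetIPv6Loop] using h
  | cons p rest ih =>
      intro pre cur plen h hnc
      by_cases hp : pre = []
      · subst hp
        simp only [pvGetIPv6Loop, if_pos rfl, List.nil_append]
        have h2 : p.head? ≠ some ':' := by
          cases p with
          | nil => simp
          | cons c cs =>
              have hcc : c ≠ ':' := fun hc => hnc (c :: cs) (by simp) (by simp [hc])
              simpa using hcc
        split_ifs with hstop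
        · exact h2
        · exact ih p _ _ h2 (fun q hq => hnc q (List.mem_cons_of_mem _ hq))
      · simp only [pvGetIPv6Loop, if_neg hp]
        obtain ⟨a, pre', hpe⟩ := List.exists_cons_of_ne_nil hp
        have h2 : (pre ++ [':'] ++ p).head? ≠ some ':' := by subst hpe; simpa using h
        split_ifs with hstop
        · exact h2
        · exact ih _ _ _ h2 (fun q hq => hnc q (List.mem_cons_of_mem _ hq))

lemma pvStr_eq_iff (l1 l2 : List Char) : String.ofList l1 = String.ofList l2 ↔ l1 = l2 := by
  constructor
  · intro h
    have := congrArg String.toList h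
    simpa using this
  · intro h; rw [h]

-- ===== VERDICT (by name: the statement is the Claim_ definition above) =====
theorem getIPv6Prefix_spec : Claim_unchanged_getIPv6Prefix := by
  intro addr plen _ hnd
  rw [pvAlt_eq]
  unfold getIPv6Prefix
  rw [pvSplitOn_eq]
  rcases hsp : pvSplit addr.toList [] with _ | ⟨p, rest⟩
  · exact absurd hsp (pvSplit_ne_nil _ _)
  · by_cases hle : plen ≤ 32
    · rw [pvK_one hle (by simp), List.take_one]
      simp [pvGetIPv6Loop, hle, PySem.Chars.join_singleton]
    · push_neg at hle
      cases rest with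
      | nil =>
          rw [show ([p] : List (List Char)).length = 1 from rfl,
              show pvK plen 1 = 1 by unfold pvK; omega]
          simp [pvGetIPv6Loop, show ¬ plen ≤ 0 + 32 by omega,
                PySem.Chars.join_singleton]
      | cons q rest' =>
          have hsw : PySem.Str.startswith addr ":" = false := by
            cases h : PySem.Str.startswith addr ":" with
            | false => rfl
            | true =>
                exact absurd (show D_getIPv6Prefix addr plen from ⟨h, hle⟩) hnd
          have hp : p ≠ [] := by
            cases haddr : addr.toList with
            | nil => rw [haddr] at hsp; simp [pvSplit] at hsp
            | cons c t =>
                have hc : c ≠ ':' := by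
                  intro hcc
                  subst hcc
                  simp [PySem.Str.startswith, PySem.Chars.startswith, haddr,
                        List.isPrefixOf] at hsw
                rw [haddr] at hsp
                rw [pvSplit, if_neg hc] at hsp
                obtain ⟨h1, t1, hh⟩ := pvSplit_head t [c]
                rw [hh] at hsp
                injection hsp with h2 _
                simp [← h2]
          have hloop : pvGetIPv6Loop plen (p :: q :: rest') [] 0 =
              pvGetIPv6Loop plen (q :: rest') p 32 := by
            show (if plen ≤ 0 + 32 then (if ([] : List Char) = [] then ([] : List Char) else [] ++ [':']) ++ p
                  else pvGetIPv6Loop plen (q :: rest')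
                    ((if ([] : List Char) = [] then ([] : List Char) else [] ++ [':']) ++ p) (0 + 32)) = _
            rw [if_neg (by omega), if_pos rfl]
            norm_num
          rw [hloop, pvLoop_char _ p 32 plen hp,
              show (p :: q :: rest').length = (q :: rest').length + 1 from rfl,
              pvK_step hle, List.take_succ_cons, pvJoin_cons,
              show plen - 32 = plen - (32 : Int) from rfl]

theorem getIPv6Prefix_changed : Claim_changed_getIPv6Prefix := by
  unfold Claim_changed_getIPv6Prefix; decide

theorem getIPv6Prefix_tight : Claim_exact_getIPv6Prefix := by
  intro addr plen _ hd
  obtain ⟨hsw, hple⟩ := hd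
  obtain ⟨t, haddr⟩ : ∃ t, addr.toList = ':' :: t := by
    cases haddr : addr.toList with
    | nil => simp [PySem.Str.startswith, PySem.Chars.startswith, haddr, List.isPrefixOf] at hsw
    | cons c u =>
        have hcc : c = ':' := by
          simp [PySem.Str.startswith, PySem.Chars.startswith, haddr] at hsw
          exact hsw.symm
        exact ⟨u, by rw [hcc]⟩
  intro heq
  unfold getIPv6Prefix at heq
  rw [pvAlt_eq, pvSplitOn_eq] at heq
  rw [pvStr_eq_iff] at heq
  have hA : (pvGetIPv6Loop plen (pvSplit addr.toList []) [] 0).head? ≠ some ':' := by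
    refine pvLoop_head _ [] 0 plen (by simp) ?_
    exact pvSplit_no_colon addr.toList [] (by simp)
  apply hA
  rw [heq]
  rcases hq : pvSplit t [] with _ | ⟨q, rest⟩
  · exact absurd hq (pvSplit_ne_nil _ _)
  · have hparts : pvSplit addr.toList [] = [] :: q :: rest := by
      rw [haddr, pvSplit, if_pos rfl, hq]; rfl
    rw [hparts]
    have hk : 2 ≤ pvK plen ([] :: q :: rest).length :=
      pvK_two hple (by simp)
    obtain ⟨k', hk'⟩ : ∃ k', pvK plen ([] :: q :: rest).length = k' + 2 :=
      ⟨pvK plen ([] :: q :: rest).length - 2, by omega⟩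
    rw [hk', List.take_succ_cons, List.take_succ_cons, pvJoin_cons]
    simp [pvFlat]
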